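-- pv_equiv track=rewrite | github.com/nikoliazekter/InformationSecurity | Assignment 2/helpers.py | blocks_to_stream
-- ===== SOURCE A (Python) =====
-- import itertools
--
-- def blocks_to_stream(blocks, padding=False):
--     if not padding:
--         return list(itertools.chain(*blocks))
--
--     stream = []
--     last_block = []
--     for block in blocks:
--         stream += last_block
--         last_block = block
--     stream += unpad(last_block)
--     return stream
--
-- def unpad(block):
--     padding_len = block[-1]
--     return block[:len(block) - padding_len]
-- ===== SOURCE B (Python) =====
-- def blocks_to_stream(blocks, padding=False):
--     def go(bs):
--         if not bs:
--             return []
--         first, rest = bs[0], bs[1:]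
--         if padding and not rest:
--             return first[:len(first) - first[-1]]
--         return first + go(rest)
--     return go(list(blocks))
-- ===== Notes on version B (the rewrite author's own statement) =====
-- stated objective: alternative
-- what changed: Replaces A's iterative loop with a one-element lagging accumulator (deferred 'stream += last_block') by structural recursion on the block list that builds the output back-to-front with no accumulator, trimming the padding inline when it reaches the last block.
import Mathlib
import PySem

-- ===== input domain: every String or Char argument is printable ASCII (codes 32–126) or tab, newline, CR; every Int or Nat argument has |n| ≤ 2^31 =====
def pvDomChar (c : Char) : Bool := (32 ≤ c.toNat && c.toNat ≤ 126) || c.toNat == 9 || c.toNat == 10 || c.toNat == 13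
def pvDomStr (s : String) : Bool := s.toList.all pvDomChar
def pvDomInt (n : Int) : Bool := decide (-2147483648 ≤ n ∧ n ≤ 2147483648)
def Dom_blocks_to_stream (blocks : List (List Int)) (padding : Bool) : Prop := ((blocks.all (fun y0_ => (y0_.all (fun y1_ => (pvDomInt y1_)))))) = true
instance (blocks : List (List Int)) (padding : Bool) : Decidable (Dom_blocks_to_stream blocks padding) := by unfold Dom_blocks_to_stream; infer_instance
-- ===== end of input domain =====

-- B replaces A's lagging-accumulator loop by structural recursion on the block
-- list, building the output back-to-front and trimming the last block inline
-- (objective: alternative decomposition, same cost).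

-- ===== PORT A =====
-- unpad: block[-1] on an empty block raises IndexError (excluded by Pre_); getD 0 is never reached inside Pre_
def unpad (block : List Int) : List Int :=
  let padding_len := (PySem.List.pyGet? block (-1)).getD 0
  PySem.List.slice block none (some ((block.length : Int) - padding_len))

def blocks_to_stream (blocks : List (List Int)) (padding : Bool) : List Int :=
  if padding = false then blocks.flatten
  else
    let st := blocks.foldl (fun (s : List Int × List Int) block => (s.1 ++ s.2, block)) ([], [])
    st.1 ++ unpad st.2

-- ===== PORT B =====
-- recursion on the block list; first[-1] on an empty last block raises IndexError in B too (excluded by Pre_)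
def blocks_to_stream_alt_go (padding : Bool) : List (List Int) → List Int
  | [] => []
  | first :: rest =>
    if padding && rest.isEmpty then
      PySem.List.slice first none
        (some ((first.length : Int) - (PySem.List.pyGet? first (-1)).getD 0))
    else first ++ blocks_to_stream_alt_go padding rest

def blocks_to_stream_alt (blocks : List (List Int)) (padding : Bool) : List Int :=
  blocks_to_stream_alt_go padding blocks

-- ===== PRECONDITION & SPEC =====
-- Pre_ excludes only the inputs where A raises IndexError: padding=True with no blocks or an empty last block.
def Pre_blocks_to_stream (blocks : List (List Int)) (padding : Bool) : Prop :=
  padding = true → blocks.getLast?.getD [] ≠ []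
instance (blocks : List (List Int)) (padding : Bool) : Decidable (Pre_blocks_to_stream blocks padding) := by unfold Pre_blocks_to_stream; infer_instance

def pvWitness_blocks_to_stream : List (List Int) × Bool := ([[7, 8, 1]], true)

def Spec_blocks_to_stream (blocks : List (List Int)) (padding : Bool) (out : List Int) : Prop := out = blocks_to_stream_alt blocks padding
instance (blocks : List (List Int)) (padding : Bool) (out : List Int) : Decidable (Spec_blocks_to_stream blocks padding out) := by unfold Spec_blocks_to_stream; infer_instance

-- ===== CLAIM (what is proved, stated in full; the proofs are below) =====
def Claim_equal_blocks_to_stream : Prop := ∀ (blocks : List (List Int)) (padding : Bool), Dom_blocks_to_stream blocks padding → Pre_blocks_to_stream blocks padding → Spec_blocks_to_stream blocks padding (blocks_to_stream blocks padding)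

-- ===== LEMMAS AND PROOFS =====
-- A's loop keeps one block of lag: after the fold, the stream holds everything but the
-- final block and the accumulator holds the final block.
lemma lag_foldl : ∀ (bs : List (List Int)) (s l : List Int),
    bs.foldl (fun (p : List Int × List Int) block => (p.1 ++ p.2, block)) (s, l)
      = (s ++ ((l :: bs).dropLast).flatten, bs.getLastD l) := by
  intro bs
  induction bs with
  | nil => intro s l; simp
  | cons b t ih =>
    intro s l
    simp only [List.foldl_cons, ih]
    cases t <;> simp [List.getLastD, List.append_assoc]

-- B's recursion without padding is plain concatenation.
lemma go_false : ∀ (bs : List (List Int)), blocks_to_stream_alt_go false bs = bs.flatten := by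
  intro bs
  induction bs with
  | nil => rfl
  | cons b t ih => simp [blocks_to_stream_alt_go, ih]

-- B's recursion with padding on a nonempty list: flatten all but the last, unpad the last.
lemma go_true : ∀ (t : List (List Int)) (b : List Int),
    blocks_to_stream_alt_go true (b :: t)
      = ((b :: t).dropLast).flatten ++ unpad ((b :: t).getLastD []) := by
  intro t
  induction t with
  | nil => intro b; simp [blocks_to_stream_alt_go, unpad]
  | cons c t ih =>
    intro b
    have h1 : blocks_to_stream_alt_go true (b :: c :: t)
        = b ++ blocks_to_stream_alt_go true (c :: t) := by
      simp [blocks_to_stream_alt_go]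
    rw [h1, ih c]
    simp [List.getLastD, List.append_assoc]

theorem blocks_to_stream_spec : Claim_equal_blocks_to_stream := by
  intro blocks padding _ hpre
  unfold Spec_blocks_to_stream blocks_to_stream blocks_to_stream_alt
  cases padding with
  | false => simp [go_false]
  | true =>
    cases blocks with
    | nil => exact absurd (hpre rfl) (by simp)
    | cons b t =>
      simp only [lag_foldl, go_true]
      simp [List.getLastD]
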